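-- pv_equiv track=rewrite | github.com/adam-rex/rcap | rex-robson/scripts/import-linkedin.py | parse_two_line_classification
-- ===== SOURCE A (Python) =====
-- def parse_two_line_classification(raw: str) -> tuple[str | None, str | None]:
--     """Parse contact_type and sector from model output (two-line keyed format)."""
--     ctype: str | None = None
--     sector: str | None = None
--     for ln in raw.splitlines():
--         line = ln.strip()
--         if not line or ":" not in line:
--             continue
--         key, _, rest = line.partition(":")
--         k = key.strip().lower().replace(" ", "_")
--         val = rest.strip()
--         if k == "contact_type":
--             ctype = val or None
--         elif k == "sector":
--             sector = val or None
--     return ctype, sector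
-- ===== SOURCE B (Python) =====
-- def parse_two_line_classification(raw: str) -> tuple[str | None, str | None]:
--     """Scan the lines BACK TO FRONT and keep the first match for each key
--     (= the last occurrence in the original order), stopping early once both
--     keys have been seen."""
--     ctype = sector = None
--     have_c = have_s = False
--     for ln in reversed(raw.splitlines()):
--         if have_c and have_s:
--             break
--         line = ln.strip()
--         key, sep, rest = line.partition(":")
--         if not sep:
--             continue
--         k = key.strip().lower().replace(" ", "_")
--         if k == "contact_type" and not have_c:
--             have_c = True
--             ctype = rest.strip() or None
--         elif k == "sector" and not have_s:
--             have_s = True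
--             sector = rest.strip() or None
--     return ctype, sector
-- ===== Notes on version B (the rewrite author's own statement) =====
-- stated objective: alternative
-- what changed: Instead of A's forward overwrite loop, B scans the lines in reverse, records the first match per key (= last occurrence forward), and breaks as soon as both keys are found; the blank/no-colon guard becomes a partition-separator test.
import Mathlib
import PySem

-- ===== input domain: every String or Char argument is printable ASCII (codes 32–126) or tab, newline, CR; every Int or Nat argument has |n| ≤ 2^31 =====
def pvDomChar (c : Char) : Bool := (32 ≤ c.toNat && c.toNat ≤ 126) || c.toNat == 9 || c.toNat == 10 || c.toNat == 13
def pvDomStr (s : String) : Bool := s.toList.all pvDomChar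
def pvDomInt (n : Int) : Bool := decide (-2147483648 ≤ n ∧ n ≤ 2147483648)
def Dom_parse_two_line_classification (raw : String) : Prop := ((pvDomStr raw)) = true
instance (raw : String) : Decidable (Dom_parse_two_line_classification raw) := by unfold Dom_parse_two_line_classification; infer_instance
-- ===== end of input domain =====

-- B scans the lines back to front keeping the first match per key (= last occurrence
-- forward) with an early exit; objective: alternative traversal, same O(n) cost.

-- ===== PORT A =====
def parse_two_line_classification (raw : String) : Option String × Option String :=
  (PySem.Str.splitlines raw).foldl (fun st ln =>
    let line := PySem.Str.strip ln
    if line == "" || !(PySem.Str.isIn ":" line) then st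
    else
      -- hand port of line.partition(":"): ':' is present by the guard, split at its first index
      let i := (PySem.Str.find line ":").toNat
      let key := String.mk (line.toList.take i)
      let rest := String.mk (line.toList.drop (i + 1))
      let k := PySem.Str.replace (PySem.Str.lower (PySem.Str.strip key)) " " "_"
      let val := PySem.Str.strip rest
      if k == "contact_type" then ((if val == "" then none else some val), st.2)
      else if k == "sector" then (st.1, (if val == "" then none else some val))
      else st)
    (none, none)

-- ===== PORT B =====
def pvAltGo : List String → Option String → Option String → Bool → Bool → Option String × Option String
  | [], c, s, _, _ => (c, s)
  | ln :: restLines, c, s, hc, hs =>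
    if hc && hs then (c, s)
    else
      let line := PySem.Str.strip ln
      -- hand port of line.partition(":"): 'not sep' ↔ no ':' in line ↔ find = -1
      let i := PySem.Str.find line ":"
      if i == -1 then pvAltGo restLines c s hc hs
      else
        let key := String.mk (line.toList.take i.toNat)
        let r := PySem.Str.strip (String.mk (line.toList.drop (i.toNat + 1)))
        let k := PySem.Str.replace (PySem.Str.lower (PySem.Str.strip key)) " " "_"
        if k == "contact_type" && !hc then
          pvAltGo restLines (if r == "" then none else some r) s true hs
        else if k == "sector" && !hs then
          pvAltGo restLines c (if r == "" then none else some r) hc true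
        else pvAltGo restLines c s hc hs

def parse_two_line_classification_alt (raw : String) : Option String × Option String :=
  pvAltGo (PySem.Str.splitlines raw).reverse none none false false

-- ===== PRECONDITION & SPEC =====
def Spec_parse_two_line_classification (raw : String) (out : Option String × Option String) : Prop := out = parse_two_line_classification_alt raw
instance (raw : String) (out : Option String × Option String) : Decidable (Spec_parse_two_line_classification raw out) := by unfold Spec_parse_two_line_classification; infer_instance

-- ===== CLAIM (what is proved, stated in full; the proofs are below) =====
def Claim_equal_parse_two_line_classification : Prop := ∀ (raw : String), Dom_parse_two_line_classification raw → Spec_parse_two_line_classification raw (parse_two_line_classification raw)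

-- ===== LEMMAS AND PROOFS =====

-- normalized key of a line (the expression both ports compute, in simp-normal form)
def pvKeyOf (ln : String) : String :=
  PySem.Str.replace (PySem.Str.lower (PySem.Str.strip (String.mk
    (List.take (PySem.Chars.find (PySem.Chars.strip ln.toList) [':']).toNat
      (PySem.Chars.strip ln.toList))))) " " "_"

-- value-or-None of a line (simp-normal form)
def pvValOf (ln : String) : Option String :=
  if PySem.Str.strip (String.mk (List.drop ((PySem.Chars.find (PySem.Chars.strip ln.toList) [':']).toNat + 1)
      (PySem.Chars.strip ln.toList))) = "" then none
  else some (PySem.Str.strip (String.mk (List.drop ((PySem.Chars.find (PySem.Chars.strip ln.toList) [':']).toNat + 1)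
      (PySem.Chars.strip ln.toList))))

-- the line carries a ':' and its normalized key is kw
def pvHit (kw : String) (ln : String) : Bool :=
  !(PySem.Chars.find (PySem.Chars.strip ln.toList) [':'] == -1) && (pvKeyOf ln == kw)

def pvRes (o : Option String) (d : Option String) : Option String :=
  match o with
  | some ln => pvValOf ln
  | none => d

theorem pv_strip_ne_empty {ln : String}
    (h : PySem.Chars.isIn [':'] (PySem.Chars.strip ln.toList) = true) :
    ¬ PySem.Str.strip ln = "" := by
  intro he
  have h2 : PySem.Chars.strip ln.toList = [] := by
    have := congrArg String.toList he
    simpa using this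
  rw [h2, PySem.Chars.isIn_iff_infix] at h
  simp at h

theorem pv_isIn_of_find {ln : String}
    (h : ¬ PySem.Chars.find (PySem.Chars.strip ln.toList) [':'] = -1) :
    PySem.Chars.isIn [':'] (PySem.Chars.strip ln.toList) = true := by
  rw [PySem.Chars.isIn_iff_infix]
  exact (PySem.Chars.find_ne_neg_one_iff _ _).mp h

theorem pv_isIn_false_of_find {ln : String}
    (h : PySem.Chars.find (PySem.Chars.strip ln.toList) [':'] = -1) :
    PySem.Chars.isIn [':'] (PySem.Chars.strip ln.toList) = false := by
  rw [PySem.Chars.isIn_eq_false_iff]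
  exact (PySem.Chars.find_eq_neg_one_iff _ _).mp h

-- A's per-line step, expressed through pvHit / pvValOf
theorem pv_stepA (c0 s0 : Option String) (ln : String) :
    (let line := PySem.Str.strip ln
     if line == "" || !(PySem.Str.isIn ":" line) then (c0, s0)
     else
       let i := (PySem.Str.find line ":").toNat
       let key := String.mk (line.toList.take i)
       let rest := String.mk (line.toList.drop (i + 1))
       let k := PySem.Str.replace (PySem.Str.lower (PySem.Str.strip key)) " " "_"
       let val := PySem.Str.strip rest
       if k == "contact_type" then ((if val == "" then none else some val), (c0, s0).2)
       else if k == "sector" then ((c0, s0).1, (if val == "" then none else some val))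
       else (c0, s0))
    = (if pvHit "contact_type" ln then (pvValOf ln, s0)
       else if pvHit "sector" ln then (c0, pvValOf ln)
       else (c0, s0)) := by
  by_cases hg : PySem.Chars.find (PySem.Chars.strip ln.toList) [':'] = -1
  · have hIn := pv_isIn_false_of_find hg
    simp [pvHit, hg, hIn]
  · have hIn := pv_isIn_of_find hg
    have hne := pv_strip_ne_empty hIn
    by_cases hkc : pvKeyOf ln = "contact_type"
    · have h1 : pvHit "contact_type" ln = true := by simp [pvHit, hg, hkc]
      rw [pvKeyOf] at hkc
      simp [hne, hIn, h1, hkc, pvValOf]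
    · by_cases hks : pvKeyOf ln = "sector"
      · have h1 : pvHit "contact_type" ln = false := by simp [pvHit, hkc]
        have h2 : pvHit "sector" ln = true := by simp [pvHit, hg, hks]
        rw [pvKeyOf] at hks
        have hkc' := hkc
        rw [pvKeyOf] at hkc'
        simp [hne, hIn, h1, h2, hks, pvValOf]
      · have h1 : pvHit "contact_type" ln = false := by simp [pvHit, hkc]
        have h2 : pvHit "sector" ln = false := by simp [pvHit, hks]
        have hkc' := hkc
        rw [pvKeyOf] at hkc'
        have hks' := hks
        rw [pvKeyOf] at hks'
        simp [hne, hIn, h1, h2, hkc', hks']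

theorem pvHit_not_both {ln : String} (h : pvHit "contact_type" ln = true) :
    pvHit "sector" ln = false := by
  simp only [pvHit, Bool.and_eq_true, beq_iff_eq] at h
  simp [pvHit, h.2]

theorem pvHit_not_both' {ln : String} (h : pvHit "sector" ln = true) :
    pvHit "contact_type" ln = false := by
  simp only [pvHit, Bool.and_eq_true, beq_iff_eq] at h
  simp [pvHit, h.2]

theorem pvRes_append_pos {kw : String} (l : List String) (x : String) (d : Option String)
    (h : pvHit kw x = true) :
    pvRes ((l ++ [x]).find? (pvHit kw)) d = pvRes (l.find? (pvHit kw)) (pvValOf x) := by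
  rw [List.find?_append, List.find?_cons_of_pos h]
  cases hf : l.find? (pvHit kw) <;> simp [pvRes]

theorem pvRes_append_neg {kw : String} (l : List String) (x : String) (d : Option String)
    (h : pvHit kw x = false) :
    pvRes ((l ++ [x]).find? (pvHit kw)) d = pvRes (l.find? (pvHit kw)) d := by
  rw [List.find?_append, List.find?_cons_of_neg (by simp [h]), List.find?_nil]
  cases hf : l.find? (pvHit kw) <;> simp [pvRes]

theorem pv_foldA (ls : List String) (c0 s0 : Option String) :
    ls.foldl (fun (st : Option String × Option String) ln =>
      let line := PySem.Str.strip ln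
      if line == "" || !(PySem.Str.isIn ":" line) then st
      else
        let i := (PySem.Str.find line ":").toNat
        let key := String.mk (line.toList.take i)
        let rest := String.mk (line.toList.drop (i + 1))
        let k := PySem.Str.replace (PySem.Str.lower (PySem.Str.strip key)) " " "_"
        let val := PySem.Str.strip rest
        if k == "contact_type" then ((if val == "" then none else some val), st.2)
        else if k == "sector" then (st.1, (if val == "" then none else some val))
        else st) (c0, s0)
    = (pvRes (ls.reverse.find? (pvHit "contact_type")) c0,
       pvRes (ls.reverse.find? (pvHit "sector")) s0) := by
  induction ls generalizing c0 s0 with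
  | nil => simp [pvRes]
  | cons x ls ih =>
    rw [List.foldl_cons, pv_stepA, List.reverse_cons]
    by_cases h1 : pvHit "contact_type" x = true
    · have h2 := pvHit_not_both h1
      rw [if_pos h1, ih, pvRes_append_pos _ _ _ h1, pvRes_append_neg _ _ _ h2]
    · rw [if_neg h1]
      have h1' : pvHit "contact_type" x = false := by
        cases h : pvHit "contact_type" x
        · rfl
        · exact absurd h h1
      by_cases h2 : pvHit "sector" x = true
      · rw [if_pos h2, ih, pvRes_append_pos _ _ _ h2, pvRes_append_neg _ _ _ h1']
      · have h2' : pvHit "sector" x = false := by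
          cases h : pvHit "sector" x
          · rfl
          · exact absurd h h2
        rw [if_neg h2, ih, pvRes_append_neg _ _ _ h1', pvRes_append_neg _ _ _ h2']

theorem pv_altGo (ls : List String) (c s : Option String) (hc hs : Bool) :
    pvAltGo ls c s hc hs =
      ((if hc then c else pvRes (ls.find? (pvHit "contact_type")) c),
       (if hs then s else pvRes (ls.find? (pvHit "sector")) s)) := by
  induction ls generalizing c s hc hs with
  | nil => cases hc <;> cases hs <;> simp [pvAltGo, pvRes]
  | cons x ls ih =>
    by_cases hb : (hc && hs) = true
    · obtain ⟨h1, h2⟩ := Bool.and_eq_true_iff.mp hb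
      subst h1; subst h2
      simp [pvAltGo]
    · by_cases hg : PySem.Chars.find (PySem.Chars.strip x.toList) [':'] = -1
      · have hh1 : pvHit "contact_type" x = false := by simp [pvHit, hg]
        have hh2 : pvHit "sector" x = false := by simp [pvHit, hg]
        simp [pvAltGo, hb, hg, ih, hh1, hh2]
      · by_cases hkc : pvKeyOf x = "contact_type"
        · have hh1 : pvHit "contact_type" x = true := by simp [pvHit, hg, hkc]
          have hh2 := pvHit_not_both hh1
          rw [pvKeyOf] at hkc
          cases hc with
          | false => simp [pvAltGo, hb, hg, hkc, ih, hh1, hh2, pvRes, pvValOf]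
          | true => simp [pvAltGo, hb, hg, hkc, ih, hh2, pvRes, pvValOf]
        · by_cases hks : pvKeyOf x = "sector"
          · have hh2 : pvHit "sector" x = true := by simp [pvHit, hg, hks]
            have hh1 := pvHit_not_both' hh2
            have hkc' := hkc
            rw [pvKeyOf] at hks hkc'
            cases hc <;> cases hs <;>
              simp [pvAltGo, hb, hg, hks, ih, hh1, hh2, pvRes, pvValOf]
          · have hh1 : pvHit "contact_type" x = false := by simp [pvHit, hkc]
            have hh2 : pvHit "sector" x = false := by simp [pvHit, hks]
            have hkc' := hkc
            have hks' := hks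
            rw [pvKeyOf] at hkc' hks'
            simp [pvAltGo, hb, hg, hkc', hks', ih, hh1, hh2]

-- ===== VERDICT (by name: the statement is the Claim_ definition above) =====
theorem parse_two_line_classification_spec : Claim_equal_parse_two_line_classification := by
  intro raw _
  unfold Spec_parse_two_line_classification parse_two_line_classification parse_two_line_classification_alt
  rw [pv_foldA, pv_altGo]
  simp
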